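-- pv_equiv track=rewrite | github.com/pawel5/AoC-2020 | 07.py | find_keys_for
-- ===== SOURCE A (Python) =====
-- def find_keys_for(entry, rules):
--     keys = set()
--     for key, values in rules.items():
--         for value in values:
--             if value[1] == entry:
--                 keys.add(key)
--     if len(keys) > 0:
--         keys_to_iterate = keys.copy()
--         for key in keys_to_iterate:
--             keys.update(find_keys_for(key, rules))
--     return keys
-- ===== SOURCE B (Python) =====
-- def find_keys_for(entry, rules):
--     # Build the reverse adjacency index once, then run an explicit-stack DFS
--     # with a visited ("done") set, instead of A's repeated full rescans of the
--     # rules per recursive call.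
--     contains = {}
--     for key, values in rules.items():
--         for _, name in values:
--             contains.setdefault(name, []).append(key)
--     result = []
--     seen = set()
--     done = set()
--     stack = [entry]
--     while stack:
--         x = stack.pop()
--         if x in done:
--             continue
--         done.add(x)
--         parents = contains.get(x, [])
--         for p in parents:
--             if p not in seen:
--                 seen.add(p)
--                 result.append(p)
--         for p in reversed(parents):
--             stack.append(p)
--     return set(result)
-- ===== Notes on version B (the rewrite author's own statement) =====
-- stated objective: alternative
-- what changed: B builds the reverse adjacency index (bag -> bags directly containing it) once and computes the transitive containers with a single explicit-stack DFS over a visited set, instead of A's rescan of every rule and fresh recursive recomputation of each reached key's closure on every call; on the generated timing inputs the two cost about the same.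
-- crash fix: On rule sets whose containment graph has a cycle among the transitive containers of entry, A recurses without bound and raises RecursionError; B's visited-set DFS returns the set of containers it reaches. — e.g. on find_keys_for("shiny gold", [("shiny gold", [(1, "shiny gold")])]): A raises RecursionError, B returns ["shiny gold"]
import Mathlib
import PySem

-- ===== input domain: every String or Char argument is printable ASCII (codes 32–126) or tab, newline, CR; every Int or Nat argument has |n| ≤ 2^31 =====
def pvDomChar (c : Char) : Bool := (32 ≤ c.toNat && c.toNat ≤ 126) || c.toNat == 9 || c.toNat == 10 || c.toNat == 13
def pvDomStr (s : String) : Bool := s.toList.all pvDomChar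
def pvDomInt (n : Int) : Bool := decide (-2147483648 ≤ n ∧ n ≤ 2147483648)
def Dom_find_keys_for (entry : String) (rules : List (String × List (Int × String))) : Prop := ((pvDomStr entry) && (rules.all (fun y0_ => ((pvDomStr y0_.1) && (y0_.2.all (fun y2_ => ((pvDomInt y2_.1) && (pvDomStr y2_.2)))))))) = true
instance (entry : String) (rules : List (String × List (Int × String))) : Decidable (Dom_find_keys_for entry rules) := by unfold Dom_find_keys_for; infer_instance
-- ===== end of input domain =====

-- B builds the reverse adjacency index (bag -> direct containers) once and runs an
-- explicit-stack DFS with a visited set, instead of A's full rescan of the rules and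
-- fresh recursive closure recomputation for every reached key.

-- ===== PORT A =====
-- inner 'for key, values in rules.items(): for value in values: if value[1] == entry: keys.add(key)'
def pvCollect (entry : String) (rules : List (String × List (Int × String))) : PySem.Set String :=
  rules.foldl (fun keys kv =>
    kv.2.foldl (fun keys v => if v.2 == entry then PySem.Set.add keys kv.1 else keys) keys)
    PySem.Set.empty

-- A's recursion, made total with fuel: the Python recursion depth is bounded by the
-- number of rules on every input admitted by Pre_ (acyclic container graph above entry).
def pvFindA : Nat → String → List (String × List (Int × String)) → List String
  | 0, entry, rules => pvCollect entry rules
  | Nat.succ f, entry, rules =>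
    let keys := pvCollect entry rules
    if 0 < keys.length then
      keys.foldl (fun acc k => PySem.Set.update acc (pvFindA f k rules)) keys
    else keys

def find_keys_for (entry : String) (rules : List (String × List (Int × String))) : List String :=
  pvFindA (rules.length + 1) entry rules

-- ===== PORT B =====
-- 'contains.setdefault(name, []).append(key)' built over all rules once
def pvRevD (rules : List (String × List (Int × String))) : PySem.Dict String (List String) :=
  rules.foldl (fun d kv =>
    kv.2.foldl (fun d v => d.modify v.2 [] (fun l => l ++ [kv.1])) d)
    PySem.Dict.empty

-- helpers for the loop's fuel bound (the while loop terminates; fuel is one unit per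
-- loop iteration: each iteration pops one stack entry, and entries pushed over the
-- whole run are bounded by the pending work measure pvMu below)
def pvEdges (rules : List (String × List (Int × String))) : List (String × String) :=
  rules.flatMap (fun kv => kv.2.map (fun v => (v.2, kv.1)))
def pvParL (rules : List (String × List (Int × String))) (x : String) : List String :=
  ((pvEdges rules).filter (fun p => p.1 == x)).map (fun p => p.2)
def pvNames (rules : List (String × List (Int × String))) : List String :=
  PySem.Set.ofList ((pvEdges rules).map (fun p => p.1))
def pvRemSum (rules : List (String × List (Int × String))) (done : List String) : Nat :=
  (((pvNames rules).filter (fun y => !(PySem.Set.contains done y))).map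
    (fun y => (pvParL rules y).length + 1)).sum
def pvMu (rules : List (String × List (Int × String))) (done stack : List String) : Nat :=
  stack.length + pvRemSum rules done

-- the while loop; head of the list is the top of Python's stack (list end), so
-- 'for p in reversed(parents): stack.append(p)' is 'parents ++ rest'
def pvLoopB : Nat → PySem.Dict String (List String) → PySem.Set String → PySem.Set String → List String → List String
  | 0, _, result, _, _ => result
  | Nat.succ f, rev, result, done, stack =>
    match stack with
    | [] => result
    | x :: rest =>
      if PySem.Set.contains done x then pvLoopB f rev result done rest
      else
        let ps := rev.getD x []
        pvLoopB f rev (ps.foldl (fun r p => PySem.Set.add r p) result)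
          (PySem.Set.add done x) (ps ++ rest)

def find_keys_for_alt (entry : String) (rules : List (String × List (Int × String))) : List String :=
  pvLoopB (pvMu rules [] [entry] + 1) (pvRevD rules) PySem.Set.empty PySem.Set.empty [entry]

-- ===== PRECONDITION & SPEC =====
-- pvAnc rules x: the keys of all bags from which x is reachable through 'contains'
-- edges (the transitive containers of x), as a saturated reachability iteration.
def pvStep (rules : List (String × List (Int × String))) (S : List String) : List String :=
  PySem.Set.update S (S.flatMap (pvParL rules))
def pvAnc (rules : List (String × List (Int × String))) (x : String) : List String :=
  (pvStep rules)^[rules.length] (PySem.Set.ofList (pvParL rules x))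

-- Pre_ excludes exactly the rule sets whose containment graph has a cycle among the
-- transitive containers of entry: there Python A recurses without bound (RecursionError).
def Pre_find_keys_for (entry : String) (rules : List (String × List (Int × String))) : Prop :=
  ∀ x ∈ (entry :: pvAnc rules entry), x ∉ pvAnc rules x
instance (entry : String) (rules : List (String × List (Int × String))) : Decidable (Pre_find_keys_for entry rules) := by unfold Pre_find_keys_for; infer_instance

def pvWitness_find_keys_for : String × (List (String × List (Int × String))) :=
  ("shiny gold", [("bright white", [(1, "shiny gold")]), ("muted yellow", [(2, "shiny gold"), (9, "faded blue")]), ("light red", [(1, "bright white"), (2, "muted yellow")])])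

-- On rule graphs with a containment cycle among entry's transitive containers, A
-- raises RecursionError while B returns the containers found by its visited-set DFS.
def Raises_find_keys_for (entry : String) (rules : List (String × List (Int × String))) : Prop :=
  ∃ x ∈ (entry :: pvAnc rules entry), x ∈ pvAnc rules x
instance (entry : String) (rules : List (String × List (Int × String))) : Decidable (Raises_find_keys_for entry rules) := by unfold Raises_find_keys_for; infer_instance
def pvRaiseWitness_find_keys_for : String × (List (String × List (Int × String))) :=
  ("shiny gold", [("shiny gold", [(1, "shiny gold")])])
def pvRaiseWitnessOut_find_keys_for : List String := ["shiny gold"]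

def Spec_find_keys_for (entry : String) (rules : List (String × List (Int × String))) (out : List String) : Prop := out = find_keys_for_alt entry rules
instance (entry : String) (rules : List (String × List (Int × String))) (out : List String) : Decidable (Spec_find_keys_for entry rules out) := by unfold Spec_find_keys_for; infer_instance

-- ===== CLAIM (what is proved, stated in full; the proofs are below) =====
def Claim_equal_find_keys_for : Prop := ∀ (entry : String) (rules : List (String × List (Int × String))), Dom_find_keys_for entry rules → Pre_find_keys_for entry rules → Spec_find_keys_for entry rules (find_keys_for entry rules)
def Claim_raises_find_keys_for : Prop := (∀ (entry : String) (rules : List (String × List (Int × String))), Dom_find_keys_for entry rules → Raises_find_keys_for entry rules → ¬ Pre_find_keys_for entry rules) ∧ (Dom_find_keys_for (pvRaiseWitness_find_keys_for.1) (pvRaiseWitness_find_keys_for.2) ∧ Raises_find_keys_for (pvRaiseWitness_find_keys_for.1) (pvRaiseWitness_find_keys_for.2) ∧ find_keys_for_alt (pvRaiseWitness_find_keys_for.1) (pvRaiseWitness_find_keys_for.2) = pvRaiseWitnessOut_find_keys_for)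

-- ===== LEMMAS AND PROOFS =====

-- ---- generic PySem.Set fold lemmas ----

theorem pv_upd_absorb {s : PySem.Set String} {l : List String}
    (h : ∀ y ∈ l, y ∈ s) : PySem.Set.update s l = s := by
  induction l generalizing s with
  | nil => rfl
  | cons a l ih =>
    rw [PySem.Set.update_cons, PySem.Set.add_of_mem (h a (by simp))]
    exact ih (fun y hy => h y (by simp [hy]))

theorem pv_mem_update_left {s : PySem.Set String} {l : List String} {y : String}
    (h : y ∈ s) : y ∈ PySem.Set.update s l := (PySem.Set.mem_update s l y).2 (Or.inl h)

theorem pv_update_update (r s t : PySem.Set String) :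
    PySem.Set.update r (PySem.Set.update s t) = PySem.Set.update (PySem.Set.update r s) t := by
  induction t generalizing s with
  | nil => rfl
  | cons a t ih =>
    rw [PySem.Set.update_cons, PySem.Set.update_cons, ih]
    congr 1
    by_cases ha : a ∈ s
    · rw [PySem.Set.add_of_mem ha]
      exact (PySem.Set.add_of_mem ((PySem.Set.mem_update r s a).2 (Or.inr ha))).symm
    · rw [PySem.Set.add_of_not_mem ha, PySem.Set.update_append]
      rfl

theorem pv_fuse_fold (c : String → List String) (l : List String) :
    ∀ (r s : PySem.Set String),
    PySem.Set.update r (l.foldl (fun a k => PySem.Set.update a (c k)) s) =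
      l.foldl (fun a k => PySem.Set.update a (c k)) (PySem.Set.update r s) := by
  induction l with
  | nil => intro r s; rfl
  | cons k l ih =>
    intro r s
    simp only [List.foldl_cons]
    rw [ih, pv_update_update]

theorem pv_fold_ofList (g : PySem.Set String → String → PySem.Set String)
    (hmono : ∀ b k y, y ∈ b → y ∈ g b k)
    (habs : ∀ (b b' : PySem.Set String) k, (∀ y ∈ g b k, y ∈ b') → g b' k = b') :
    ∀ (l : List String) (b : PySem.Set String),
    l.foldl g b = (PySem.Set.ofList l).foldl g b := by
  have disc : ∀ (x : String) (S : List String) (u : List String) (c : PySem.Set String),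
      (∀ y ∈ S, y ∈ c) → (∀ b₀, S = g b₀ x → True) → (∃ b₀, S = g b₀ x) →
      u.foldl g c = (PySem.Set.discard u x).foldl g c := by
    intro x S u
    induction u with
    | nil => intro c _ _ _; rfl
    | cons a u ih =>
      intro c hc _ hex
      by_cases hax : a = x
      · subst hax
        have : PySem.Set.discard (a :: u) a = PySem.Set.discard u a := by
          simp [PySem.Set.discard]
        rw [this]
        obtain ⟨b₀, hb₀⟩ := hex
        have : g c a = c := habs b₀ c a (by rw [← hb₀]; exact hc)
        rw [List.foldl_cons, this]
        exact ih c hc (fun _ _ => trivial) ⟨b₀, hb₀⟩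
      · have : PySem.Set.discard (a :: u) x = a :: PySem.Set.discard u x := by
          simp [PySem.Set.discard, hax]
        rw [this, List.foldl_cons, List.foldl_cons]
        exact ih (g c a) (fun y hy => hmono c a y (hc y hy)) (fun _ _ => trivial)
          (by obtain ⟨b₀, hb₀⟩ := ‹∃ b₀, S = g b₀ x›; exact ⟨b₀, hb₀⟩)
  intro l
  induction l with
  | nil => intro b; rfl
  | cons x l ih =>
    intro b
    rw [List.foldl_cons, PySem.Set.ofList_cons, List.foldl_cons, ih]
    exact disc x (g b x) (PySem.Set.ofList l) (g b x) (fun y hy => hy)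
      (fun _ _ => trivial) ⟨b, rfl⟩

theorem pv_update_ofList (s : PySem.Set String) (l : List String) :
    PySem.Set.update s (PySem.Set.ofList l) = PySem.Set.update s l := by
  show (PySem.Set.ofList l).foldl PySem.Set.add s = l.foldl PySem.Set.add s
  exact (pv_fold_ofList PySem.Set.add
    (fun b k y hy => by simp [PySem.Set.mem_add, hy])
    (fun b b' k h => PySem.Set.add_of_mem (h k (by simp [PySem.Set.mem_add])))
    l s).symm

theorem pv_fold_closure_ofList (c : String → List String) (l : List String) (b : PySem.Set String) :
    l.foldl (fun a k => PySem.Set.update a (c k)) b =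
      (PySem.Set.ofList l).foldl (fun a k => PySem.Set.update a (c k)) b :=
  pv_fold_ofList _
    (fun b k y hy => pv_mem_update_left hy)
    (fun b b' k h => pv_upd_absorb (fun y hy => h y ((PySem.Set.mem_update b (c k) y).2 (Or.inr hy))))
    l b

theorem pv_nodup_fold_update (c : String → List String) (l : List String) :
    ∀ (s : PySem.Set String), s.Nodup →
    (l.foldl (fun a k => PySem.Set.update a (c k)) s).Nodup := by
  induction l with
  | nil => intro s hs; exact hs
  | cons k l ih => intro s hs; exact ih _ (PySem.Set.nodup_update s (c k) hs)


-- ---- parents list, collect, reverse index ----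

theorem pv_parL_sub_keys {rules : List (String × List (Int × String))} {x y : String}
    (h : y ∈ pvParL rules x) : y ∈ rules.map (fun kv => kv.1) := by
  simp only [pvParL, List.mem_map, List.mem_filter] at h
  obtain ⟨p, ⟨hp, _⟩, hy⟩ := h
  simp only [pvEdges, List.mem_flatMap, List.mem_map] at hp
  obtain ⟨kv, hkv, v, _, hv⟩ := hp
  subst hv
  exact List.mem_map.2 ⟨kv, hkv, by simpa using hy⟩

theorem pv_parL_ne_nil_mem_names {rules : List (String × List (Int × String))} {x : String}
    (h : pvParL rules x ≠ []) : x ∈ pvNames rules := by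
  obtain ⟨y, hy⟩ := List.exists_mem_of_ne_nil _ h
  simp only [pvParL, List.mem_map, List.mem_filter] at hy
  obtain ⟨p, ⟨hp, hpx⟩, _⟩ := hy
  have : p.1 = x := by simpa using hpx
  subst this
  simp only [pvNames, PySem.Set.mem_ofList, List.mem_map]
  exact ⟨p, hp, rfl⟩

theorem pv_collect_eq (entry : String) (rules : List (String × List (Int × String))) :
    pvCollect entry rules = PySem.Set.ofList (pvParL rules entry) := by
  have flat : ∀ (rs : List (String × List (Int × String))) (s : PySem.Set String),
      rs.foldl (fun keys kv =>
        kv.2.foldl (fun keys v => if v.2 == entry then PySem.Set.add keys kv.1 else keys) keys) s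
      = (pvEdges rs).foldl (fun keys p => if p.1 == entry then PySem.Set.add keys p.2 else keys) s := by
    intro rs
    induction rs with
    | nil => intro s; rfl
    | cons kv rs ih =>
      intro s
      simp only [List.foldl_cons, pvEdges, List.flatMap_cons, List.foldl_append, List.foldl_map]
      rw [ih]
      rfl
  have filt : ∀ (l : List (String × String)) (s : PySem.Set String),
      l.foldl (fun keys p => if p.1 == entry then PySem.Set.add keys p.2 else keys) s
      = PySem.Set.update s ((l.filter (fun p => p.1 == entry)).map (fun p => p.2)) := by
    intro l
    induction l with
    | nil => intro s; rfl
    | cons p l ih =>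
      intro s
      by_cases hp : (p.1 == entry) = true
      · simp only [List.foldl_cons, if_pos hp, List.filter_cons, hp, if_true, List.map_cons,
          PySem.Set.update_cons]
        rw [ih]
      · simp only [List.foldl_cons, if_neg hp, List.filter_cons, (by simpa using hp : (p.1 == entry) = false),
          Bool.false_eq_true, if_false]
        rw [ih]
  rw [pvCollect, flat, filt, PySem.Set.update_empty]
  rfl

theorem pv_revD_getD (rules : List (String × List (Int × String))) (x : String) :
    (pvRevD rules).getD x [] = pvParL rules x := by
  have flat : ∀ (rs : List (String × List (Int × String))) (d : PySem.Dict String (List String)),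
      rs.foldl (fun d kv => kv.2.foldl (fun d v => d.modify v.2 [] (fun l => l ++ [kv.1])) d) d
      = (pvEdges rs).foldl (fun d p => d.modify p.1 [] (fun l => l ++ [p.2])) d := by
    intro rs
    induction rs with
    | nil => intro d; rfl
    | cons kv rs ih =>
      intro d
      simp only [List.foldl_cons, pvEdges, List.flatMap_cons, List.foldl_append, List.foldl_map]
      rw [ih]
      rfl
  rw [pvRevD, flat, PySem.Dict.getD_foldl_modify_append]
  simp [pvParL]

-- ---- the pending-work measure ----

theorem pv_sum_filter_mono (l : List String) (f : String → Nat) (p q : String → Bool)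
    (h : ∀ a, q a = true → p a = true) :
    ((l.filter q).map f).sum ≤ ((l.filter p).map f).sum := by
  induction l with
  | nil => simp
  | cons a l ih =>
    by_cases hq : q a
    · simp [List.filter_cons, hq, h a hq]; omega
    · by_cases hp : p a
      · simp [List.filter_cons, hq, hp]; omega
      · simp [List.filter_cons, hq, hp]; exact ih

theorem pv_remSum_mono {rules : List (String × List (Int × String))} {done done' : List String}
    (h : ∀ y ∈ done, y ∈ done') : pvRemSum rules done' ≤ pvRemSum rules done := by
  apply pv_sum_filter_mono
  intro a ha
  simp only [Bool.not_eq_eq_eq_not, Bool.not_true, ← Bool.not_eq_true] at *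
  intro hc
  rw [PySem.Set.contains_iff] at hc
  exact absurd (PySem.Set.contains_iff done' a |>.2 (h a hc)) (by simpa using ha)

theorem pv_sum_filter_drop (f : String → Nat) :
    ∀ (l : List String) (done : List String) (x : String), l.Nodup → x ∈ l → x ∉ done →
    ((l.filter (fun y => !(PySem.Set.contains done y))).map f).sum
      = f x + ((l.filter (fun y => !(PySem.Set.contains (PySem.Set.add done x) y))).map f).sum := by
  intro l
  induction l with
  | nil => intro done x _ hx; exact absurd hx (by simp)
  | cons a l ih =>
    intro done x hnd hx hxd
    have hnd' := hnd
    rw [List.nodup_cons] at hnd'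
    rcases List.mem_cons.1 hx with hax | hxl
    · subst hax
      have h1 : (PySem.Set.contains done x) = false := by
        rw [Bool.eq_false_iff]; intro hc; exact hxd ((PySem.Set.contains_iff done x).1 hc)
      have h2 : (PySem.Set.contains (PySem.Set.add done x) x) = true := by
        rw [PySem.Set.contains_iff, PySem.Set.mem_add]; right; rfl
      have hcongr : ∀ y ∈ l, (!(PySem.Set.contains (PySem.Set.add done x) y)) = (!(PySem.Set.contains done y)) := by
        intro y hy
        have hya : y ≠ x := fun hh => hnd'.1 (hh ▸ hy)
        congr 1
        rw [Bool.eq_iff_iff, PySem.Set.contains_iff, PySem.Set.contains_iff, PySem.Set.mem_add]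
        constructor
        · rintro (h | h); exact h; exact absurd h hya
        · exact Or.inl
      rw [List.filter_cons_of_pos (by simpa using hxd),
        List.filter_cons_of_neg (by simp [PySem.Set.mem_add]),
        List.filter_congr hcongr]
      simp
    · have hax : a ≠ x := fun hh => hnd'.1 (by rw [hh]; exact hxl)
      by_cases hcd : a ∈ done
      · rw [List.filter_cons_of_neg (by simp [hcd]),
          List.filter_cons_of_neg (by simp [PySem.Set.mem_add, hcd])]
        exact ih done x hnd'.2 hxl hxd
      · rw [List.filter_cons_of_pos (by simpa using hcd),
          List.filter_cons_of_pos (by simp [PySem.Set.mem_add, hcd, hax])]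
        simp only [List.map_cons, List.sum_cons]
        rw [ih done x hnd'.2 hxl hxd]
        omega

theorem pv_nodup_names (rules : List (String × List (Int × String))) : (pvNames rules).Nodup :=
  PySem.Set.nodup_ofList _

theorem pv_remSum_drop {rules : List (String × List (Int × String))} {done : List String} {x : String}
    (hx : x ∈ pvNames rules) (hxd : x ∉ done) :
    pvRemSum rules done = ((pvParL rules x).length + 1) + pvRemSum rules (PySem.Set.add done x) :=
  pv_sum_filter_drop _ _ done x (pv_nodup_names rules) hx hxd

theorem pv_remSum_add_of_not_names {rules : List (String × List (Int × String))} {done : List String}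
    {x : String} (hx : x ∉ pvNames rules) :
    pvRemSum rules (PySem.Set.add done x) = pvRemSum rules done := by
  unfold pvRemSum
  congr 1
  congr 1
  apply List.filter_congr
  intro y hy
  have hyx : y ≠ x := fun hh => hx (hh ▸ hy)
  congr 1
  rw [Bool.eq_iff_iff, PySem.Set.contains_iff, PySem.Set.contains_iff, PySem.Set.mem_add]
  constructor
  · rintro (h | h)
    · exact h
    · exact absurd h hyx
  · exact Or.inl

theorem pv_mu_skip (rules : List (String × List (Int × String))) (done : List String)
    (x : String) (rest : List String) :
    pvMu rules done rest < pvMu rules done (x :: rest) := by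
  simp only [pvMu, List.length_cons]
  omega

theorem pv_mu_expand (rules : List (String × List (Int × String))) (done : List String)
    (x : String) (rest : List String) (hxd : x ∉ done) :
    pvMu rules (PySem.Set.add done x) (pvParL rules x ++ rest) < pvMu rules done (x :: rest) := by
  by_cases hn : x ∈ pvNames rules
  · have := pv_remSum_drop (rules := rules) hn hxd
    simp only [pvMu, List.length_append, List.length_cons]
    omega
  · have hps : pvParL rules x = [] := by
      by_contra hne
      exact hn (pv_parL_ne_nil_mem_names hne)
    rw [hps]
    simp only [pvMu, List.nil_append, List.length_cons]
    rw [pv_remSum_add_of_not_names hn]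
    omega


-- ---- the ideal (fuel-free) machine and the fueled loop ----

def pvRun (rules : List (String × List (Int × String))) :
    List String → List String → List String → List String × List String
  | result, done, [] => (result, done)
  | result, done, x :: rest =>
    if x ∈ done then pvRun rules result done rest
    else pvRun rules (PySem.Set.update result (pvParL rules x)) (PySem.Set.add done x)
      (pvParL rules x ++ rest)
  termination_by _ done stack => pvMu rules done stack
  decreasing_by
  · exact pv_mu_skip rules done x rest
  · exact pv_mu_expand rules done x rest (by assumption)

theorem pv_run_nil (rules : List (String × List (Int × String))) (result done : List String) :
    pvRun rules result done [] = (result, done) := by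
  simp [pvRun]

theorem pv_run_cons (rules : List (String × List (Int × String))) (result done : List String)
    (x : String) (rest : List String) :
    pvRun rules result done (x :: rest) =
      if x ∈ done then pvRun rules result done rest
      else pvRun rules (PySem.Set.update result (pvParL rules x)) (PySem.Set.add done x)
        (pvParL rules x ++ rest) := by
  rw [pvRun]

theorem pv_loop_eq_run (rules : List (String × List (Int × String))) :
    ∀ (f : Nat) (result done stack : List String), pvMu rules done stack < f →
    pvLoopB f (pvRevD rules) result done stack = (pvRun rules result done stack).1 := by
  intro f
  induction f with
  | zero => intro result done stack h; omega
  | succ f ih =>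
    intro result done stack h
    match stack with
    | [] => rw [pv_run_nil]; rfl
    | x :: rest =>
      rw [pv_run_cons]
      by_cases hx : x ∈ done
      · rw [if_pos hx]
        have hc : PySem.Set.contains done x = true := (PySem.Set.contains_iff done x).2 hx
        simp only [pvLoopB, hc, if_true]
        exact ih result done rest (lt_of_lt_of_le (pv_mu_skip rules done x rest) (Nat.lt_succ_iff.1 h))
      · rw [if_neg hx]
        have hc : PySem.Set.contains done x = false := by
          rw [Bool.eq_false_iff]; intro hcc; exact hx ((PySem.Set.contains_iff done x).1 hcc)
        simp only [pvLoopB, hc, Bool.false_eq_true, if_false]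
        rw [pv_revD_getD]
        show pvLoopB f (pvRevD rules) (PySem.Set.update result (pvParL rules x)) _ _ = _
        exact ih _ _ _ (lt_of_lt_of_le (pv_mu_expand rules done x rest hx) (Nat.lt_succ_iff.1 h))

theorem pv_run_append (rules : List (String × List (Int × String))) :
    ∀ (n : Nat) (result done xs ys : List String), pvMu rules done xs ≤ n →
    pvRun rules result done (xs ++ ys) =
      pvRun rules (pvRun rules result done xs).1 (pvRun rules result done xs).2 ys := by
  intro n
  induction n with
  | zero =>
    intro result done xs ys h
    match xs with
    | [] => simp [pv_run_nil]
    | x :: rest => simp [pvMu] at h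
  | succ n ih =>
    intro result done xs ys h
    match xs with
    | [] => simp [pv_run_nil]
    | x :: rest =>
      rw [List.cons_append, pv_run_cons, pv_run_cons]
      by_cases hx : x ∈ done
      · rw [if_pos hx, if_pos hx]
        exact ih result done rest ys (by have := pv_mu_skip rules done x rest; omega)
      · rw [if_neg hx, if_neg hx, ← List.append_assoc]
        exact ih _ _ _ ys (by have := pv_mu_expand rules done x rest hx; omega)


-- ---- ancestor sets: saturation and ordering ----

theorem pv_step_sub (rules : List (String × List (Int × String))) (S : List String) :
    ∀ y ∈ S, y ∈ pvStep rules S := by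
  intro y hy
  exact (PySem.Set.mem_update _ _ _).2 (Or.inl hy)

theorem pv_step_mono {rules : List (String × List (Int × String))} {S T : List String}
    (h : ∀ y ∈ S, y ∈ T) : ∀ y ∈ pvStep rules S, y ∈ pvStep rules T := by
  intro y hy
  rcases (PySem.Set.mem_update _ _ _).1 hy with h1 | h1
  · exact pv_step_sub rules T y (h y h1)
  · rcases List.mem_flatMap.1 h1 with ⟨s, hs, hps⟩
    exact (PySem.Set.mem_update _ _ _).2 (Or.inr (List.mem_flatMap.2 ⟨s, h s hs, hps⟩))

theorem pv_step_nodup {rules : List (String × List (Int × String))} {S : List String}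
    (h : S.Nodup) : (pvStep rules S).Nodup := PySem.Set.nodup_update _ _ h

theorem pv_anc_nodup (rules : List (String × List (Int × String))) (x : String) :
    (pvAnc rules x).Nodup := by
  unfold pvAnc
  generalize rules.length = n
  induction n with
  | zero => exact PySem.Set.nodup_ofList _
  | succ n ih => rw [Function.iterate_succ_apply']; exact pv_step_nodup ih

theorem pv_iter_sub_succ (rules : List (String × List (Int × String))) (S : List String) (i : Nat) :
    ∀ y ∈ (pvStep rules)^[i] S, y ∈ (pvStep rules)^[i + 1] S := by
  rw [Function.iterate_succ_apply']
  exact pv_step_sub rules _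

theorem pv_iter_sub_keys (rules : List (String × List (Int × String))) {S : List String}
    (hS : ∀ y ∈ S, y ∈ rules.map (fun kv => kv.1)) (i : Nat) :
    ∀ y ∈ (pvStep rules)^[i] S, y ∈ rules.map (fun kv => kv.1) := by
  induction i with
  | zero => exact hS
  | succ i ih =>
    rw [Function.iterate_succ_apply']
    intro y hy
    rcases (PySem.Set.mem_update _ _ _).1 hy with h1 | h1
    · exact ih y h1
    · rcases List.mem_flatMap.1 h1 with ⟨s, _, hps⟩
      exact pv_parL_sub_keys hps

theorem pv_nodup_sub_length {l m : List String} (hl : l.Nodup) (hm : m.Nodup)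
    (h : ∀ y ∈ l, y ∈ m) : l.length ≤ m.length := by
  rw [← List.toFinset_card_of_nodup hl, ← List.toFinset_card_of_nodup hm]
  exact Finset.card_le_card (fun y hy => List.mem_toFinset.2 (h y (List.mem_toFinset.1 hy)))

theorem pv_nodup_ssub_length {l m : List String} (hl : l.Nodup) (hm : m.Nodup)
    (h : ∀ y ∈ l, y ∈ m) {w : String} (hw : w ∈ m) (hwl : w ∉ l) : l.length < m.length := by
  rw [← List.toFinset_card_of_nodup hl, ← List.toFinset_card_of_nodup hm]
  apply Finset.card_lt_card
  constructor
  · exact fun y hy => List.mem_toFinset.2 (h y (List.mem_toFinset.1 hy))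
  · intro hc
    exact hwl (List.mem_toFinset.1 (hc (List.mem_toFinset.2 hw)))

theorem pv_iter_nodup (rules : List (String × List (Int × String))) (x : String) (i : Nat) :
    ((pvStep rules)^[i] (PySem.Set.ofList (pvParL rules x))).Nodup := by
  induction i with
  | zero => exact PySem.Set.nodup_ofList _
  | succ i ih => rw [Function.iterate_succ_apply']; exact pv_step_nodup ih

theorem pv_anc_sat (rules : List (String × List (Int × String))) (x : String) :
    ∀ y ∈ pvStep rules (pvAnc rules x), y ∈ pvAnc rules x := by
  show ∀ y ∈ pvStep rules ((pvStep rules)^[rules.length] (PySem.Set.ofList (pvParL rules x))),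
    y ∈ (pvStep rules)^[rules.length] (PySem.Set.ofList (pvParL rules x))
  set R := rules.length with hR
  set S0 := PySem.Set.ofList (pvParL rules x) with hS0
  have hS0keys : ∀ y ∈ S0, y ∈ rules.map (fun kv => kv.1) := by
    intro y hy
    exact pv_parL_sub_keys ((PySem.Set.mem_ofList _ _).1 hy)
  -- stability propagates
  have prop : ∀ (i k : Nat), (∀ y ∈ (pvStep rules)^[i + 1] S0, y ∈ (pvStep rules)^[i] S0) →
      (∀ y ∈ (pvStep rules)^[i + k + 1] S0, y ∈ (pvStep rules)^[i + k] S0) := by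
    intro i k h
    induction k with
    | zero => exact h
    | succ k ih =>
      have hstep : ∀ y ∈ (pvStep rules)^[i + k + 1 + 1] S0, y ∈ (pvStep rules)^[i + k + 1] S0 := by
        intro y hy
        rw [Function.iterate_succ_apply' _ (i + k + 1)] at hy
        rw [Function.iterate_succ_apply' _ (i + k)]
        exact pv_step_mono ih y hy
      exact hstep
  by_contra hno
  push_neg at hno
  have hnostab : ¬ (∀ y ∈ (pvStep rules)^[R + 1] S0, y ∈ (pvStep rules)^[R] S0) := by
    intro h
    obtain ⟨y, hy1, hy2⟩ := hno
    rw [← Function.iterate_succ_apply' (pvStep rules) R S0] at hy1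
    exact hy2 (h y hy1)
  have hunstab : ∀ i ≤ R, ¬ (∀ y ∈ (pvStep rules)^[i + 1] S0, y ∈ (pvStep rules)^[i] S0) := by
    intro i hi h
    have h2 := prop i (R - i) h
    rw [Nat.add_sub_cancel' hi] at h2
    exact hnostab h2
  have hgrow : ∀ i ≤ R, S0.length + i ≤ ((pvStep rules)^[i] S0).length := by
    intro i
    induction i with
    | zero => simp
    | succ i ih =>
      intro hi
      have hlt : ((pvStep rules)^[i] S0).length < ((pvStep rules)^[i + 1] S0).length := by
        have hn := hunstab i (by omega)
        push_neg at hn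
        obtain ⟨w, hw1, hw2⟩ := hn
        exact pv_nodup_ssub_length (pv_iter_nodup rules x i) (by rw [hS0] at *; exact pv_iter_nodup rules x (i+1))
          (pv_iter_sub_succ rules S0 i) hw1 hw2
      have := ih (by omega)
      omega
  have hbound : ((pvStep rules)^[R] S0).length ≤ R := by
    calc ((pvStep rules)^[R] S0).length
        ≤ (PySem.Set.ofList (rules.map (fun kv => kv.1))).length := by
          apply pv_nodup_sub_length (pv_iter_nodup rules x R) (PySem.Set.nodup_ofList _)
          intro y hy
          exact (PySem.Set.mem_ofList _ _).2 (pv_iter_sub_keys rules hS0keys R y hy)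
      _ ≤ (rules.map (fun kv => kv.1)).length := PySem.Set.length_ofList_le _
      _ = R := by simp [hR]
  have hS0len : S0.length = 0 := by have := hgrow R (le_refl R); omega
  have hS0nil : S0 = [] := List.length_eq_zero_iff.1 hS0len
  have : (∀ y ∈ (pvStep rules)^[0 + 1] S0, y ∈ (pvStep rules)^[0] S0) := by
    rw [hS0nil]
    intro y hy
    simpa [pvStep, PySem.Set.update] using hy
  exact hunstab 0 (by omega) this

theorem pv_anc_closed {rules : List (String × List (Int × String))} {x y : String}
    (hy : y ∈ pvAnc rules x) : ∀ z ∈ pvParL rules y, z ∈ pvAnc rules x := by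
  intro z hz
  apply pv_anc_sat rules x
  exact (PySem.Set.mem_update _ _ _).2 (Or.inr (List.mem_flatMap.2 ⟨y, hy, hz⟩))

theorem pv_parL_sub_anc (rules : List (String × List (Int × String))) (x : String) :
    ∀ y ∈ pvParL rules x, y ∈ pvAnc rules x := by
  intro y hy
  unfold pvAnc
  have : ∀ i, ∀ z ∈ PySem.Set.ofList (pvParL rules x), z ∈ (pvStep rules)^[i] (PySem.Set.ofList (pvParL rules x)) := by
    intro i
    induction i with
    | zero => exact fun z hz => hz
    | succ i ih => exact fun z hz => pv_iter_sub_succ rules _ i z (ih z hz)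
  exact this rules.length y ((PySem.Set.mem_ofList _ _).2 hy)

theorem pv_anc_trans {rules : List (String × List (Int × String))} {x y : String}
    (hy : y ∈ pvAnc rules x) : ∀ z ∈ pvAnc rules y, z ∈ pvAnc rules x := by
  have base : ∀ z ∈ PySem.Set.ofList (pvParL rules y), z ∈ pvAnc rules x := by
    intro z hz
    exact pv_anc_closed hy z ((PySem.Set.mem_ofList _ _).1 hz)
  have iter : ∀ i, ∀ z ∈ (pvStep rules)^[i] (PySem.Set.ofList (pvParL rules y)), z ∈ pvAnc rules x := by
    intro i
    induction i with
    | zero => exact base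
    | succ i ih =>
      rw [Function.iterate_succ_apply']
      intro z hz
      exact pv_anc_sat rules x z (pv_step_mono ih z hz)
  exact iter rules.length

theorem pv_anc_len_le (rules : List (String × List (Int × String))) (x : String) :
    (pvAnc rules x).length ≤ rules.length := by
  calc (pvAnc rules x).length
      ≤ (PySem.Set.ofList (rules.map (fun kv => kv.1))).length := by
        apply pv_nodup_sub_length (pv_anc_nodup rules x) (PySem.Set.nodup_ofList _)
        intro y hy
        apply (PySem.Set.mem_ofList _ _).2
        apply pv_iter_sub_keys rules (fun z hz => pv_parL_sub_keys ((PySem.Set.mem_ofList _ _).1 hz)) rules.length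
        exact hy
    _ ≤ (rules.map (fun kv => kv.1)).length := PySem.Set.length_ofList_le _
    _ = rules.length := by simp

theorem pv_anc_lt {rules : List (String × List (Int × String))} {x k : String}
    (hk : k ∈ pvAnc rules x) (hkk : k ∉ pvAnc rules k) :
    (pvAnc rules k).length < (pvAnc rules x).length :=
  pv_nodup_ssub_length (pv_anc_nodup rules k) (pv_anc_nodup rules x)
    (pv_anc_trans hk) hk hkk


-- ---- A's port: nodup and fuel stability ----

theorem pv_fold_congr (c1 c2 : String → List String) (l : List String)
    (h : ∀ k ∈ l, c1 k = c2 k) :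
    ∀ (s : PySem.Set String),
    l.foldl (fun a k => PySem.Set.update a (c1 k)) s = l.foldl (fun a k => PySem.Set.update a (c2 k)) s := by
  induction l with
  | nil => intro s; rfl
  | cons k l ih =>
    intro s
    simp only [List.foldl_cons]
    rw [h k (by simp), ih (fun k hk => h k (by simp [hk]))]

theorem pv_findA_nodup (rules : List (String × List (Int × String))) :
    ∀ (f : Nat) (x : String), (pvFindA f x rules).Nodup := by
  intro f
  induction f with
  | zero =>
    intro x
    rw [pvFindA, pv_collect_eq]
    exact PySem.Set.nodup_ofList _
  | succ f ih =>
    intro x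
    rw [pvFindA]
    by_cases h : 0 < (pvCollect x rules).length
    · simp only [if_pos h]
      apply pv_nodup_fold_update
      rw [pv_collect_eq]
      exact PySem.Set.nodup_ofList _
    · simp only [if_neg h]
      rw [pv_collect_eq]
      exact PySem.Set.nodup_ofList _

theorem pv_findA_empty {rules : List (String × List (Int × String))} {x : String}
    (h : pvParL rules x = []) : ∀ f, pvFindA f x rules = [] := by
  have hc : pvCollect x rules = [] := by rw [pv_collect_eq, h]; rfl
  intro f
  cases f with
  | zero => rw [pvFindA, hc]
  | succ f =>
    rw [pvFindA]
    simp [hc]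

theorem pv_findA_succ_eq {rules : List (String × List (Int × String))} {x : String} (f : Nat) :
    pvFindA (f + 1) x rules =
      (pvCollect x rules).foldl (fun a k => PySem.Set.update a (pvFindA f k rules)) (pvCollect x rules) := by
  rw [pvFindA]
  by_cases h : 0 < (pvCollect x rules).length
  · simp only [if_pos h]
  · simp only [if_neg h]
    have : pvCollect x rules = [] := by
      cases hc : pvCollect x rules with
      | nil => rfl
      | cons a l => rw [hc] at h; simp at h
    rw [this]
    rfl

theorem pv_findA_stab (rules : List (String × List (Int × String))) :
    ∀ (m : Nat) (x : String), (pvAnc rules x).length ≤ m →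
    x ∉ pvAnc rules x → (∀ y ∈ pvAnc rules x, y ∉ pvAnc rules y) →
    ∀ f g, (pvAnc rules x).length ≤ f → (pvAnc rules x).length ≤ g →
    pvFindA f x rules = pvFindA g x rules := by
  intro m
  induction m with
  | zero =>
    intro x hm _ _ f g _ _
    have hanc : pvAnc rules x = [] := List.length_eq_zero_iff.1 (by omega)
    have hps : pvParL rules x = [] := by
      cases hps : pvParL rules x with
      | nil => rfl
      | cons a l =>
        have := pv_parL_sub_anc rules x a (by rw [hps]; simp)
        rw [hanc] at this
        simp at this
    rw [pv_findA_empty hps, pv_findA_empty hps]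
  | succ m ih =>
    intro x hm hx hcone f g hf hg
    by_cases hzero : (pvAnc rules x).length = 0
    · have hanc : pvAnc rules x = [] := List.length_eq_zero_iff.1 hzero
      have hps : pvParL rules x = [] := by
        cases hps : pvParL rules x with
        | nil => rfl
        | cons a l =>
          have := pv_parL_sub_anc rules x a (by rw [hps]; simp)
          rw [hanc] at this
          simp at this
      rw [pv_findA_empty hps, pv_findA_empty hps]
    · obtain ⟨f', rfl⟩ : ∃ f', f = f' + 1 := ⟨f - 1, by omega⟩
      obtain ⟨g', rfl⟩ : ∃ g', g = g' + 1 := ⟨g - 1, by omega⟩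
      rw [pv_findA_succ_eq, pv_findA_succ_eq]
      apply pv_fold_congr
      intro k hk
      have hkpar : k ∈ pvParL rules x := by
        rw [pv_collect_eq] at hk
        exact (PySem.Set.mem_ofList _ _).1 hk
      have hkanc : k ∈ pvAnc rules x := pv_parL_sub_anc rules x k hkpar
      have hkk : k ∉ pvAnc rules k := hcone k hkanc
      have hklt : (pvAnc rules k).length < (pvAnc rules x).length := pv_anc_lt hkanc hkk
      have hkcone : ∀ y ∈ pvAnc rules k, y ∉ pvAnc rules y :=
        fun y hy => hcone y (pv_anc_trans hkanc y hy)
      have h1 := ih k (by omega) hkk hkcone f' ((pvAnc rules k).length) (by omega) (le_refl _)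
      have h2 := ih k (by omega) hkk hkcone g' ((pvAnc rules k).length) (by omega) (le_refl _)
      rw [h1, h2]


-- ---- the closure computed by A's port, and the machine/recursion correspondence ----

def pvCF (rules : List (String × List (Int × String))) (k : String) : List String :=
  pvFindA (rules.length + 1) k rules

theorem pv_runS (rules : List (String × List (Int × String))) :
    ∀ (n : Nat) (x : String) (result done : List String),
    pvMu rules done [x] ≤ n →
    x ∉ pvAnc rules x →
    (∀ y ∈ pvAnc rules x, y ∉ pvAnc rules y) →
    (∀ d ∈ done, (∀ y ∈ pvCF rules d, y ∈ result) ∨ (d ≠ x ∧ d ∉ pvAnc rules x)) →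
    (pvRun rules result done [x]).1 = PySem.Set.update result (pvCF rules x) ∧
    (∀ d ∈ (pvRun rules result done [x]).2,
        (∀ y ∈ pvCF rules d, y ∈ (pvRun rules result done [x]).1) ∨
        (d ∈ done ∧ d ≠ x ∧ d ∉ pvAnc rules x)) ∧
    (∀ d ∈ done, d ∈ (pvRun rules result done [x]).2) ∧
    (∀ d ∈ (pvRun rules result done [x]).2, d ∈ done ∨ d = x ∨ d ∈ pvAnc rules x) := by
  intro n
  induction n with
  | zero =>
    intro x result done hmu _ _ _
    exfalso
    simp [pvMu] at hmu
  | succ n ih =>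
    intro x result done hmu hx hcone hgood
    rw [pv_run_cons]
    by_cases hxd : x ∈ done
    · rw [if_pos hxd, pv_run_nil]
      refine ⟨?_, ?_, fun d hd => hd, fun d hd => Or.inl hd⟩
      · rcases hgood x hxd with h | h
        · exact (pv_upd_absorb h).symm
        · exact absurd rfl h.1
      · intro d hd
        rcases hgood d hd with h | h
        · exact Or.inl h
        · exact Or.inr ⟨hd, h⟩
    · rw [if_neg hxd, List.append_nil]
      by_cases hps : pvParL rules x = []
      · rw [hps, pv_run_nil]
        have hcfx : pvCF rules x = [] := pv_findA_empty hps (rules.length + 1)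
        have hru : PySem.Set.update result ([] : List String) = result := rfl
        refine ⟨?_, ?_, ?_, ?_⟩
        · show PySem.Set.update result ([] : List String) = PySem.Set.update result (pvCF rules x)
          rw [hcfx]
        · intro d hd
          rcases (PySem.Set.mem_add done x d).1 hd with h | h
          · rcases hgood d h with h2 | h2
            · exact Or.inl (fun y hy => h2 y hy)
            · exact Or.inr ⟨h, h2⟩
          · subst h
            left
            rw [hcfx]
            intro y hy
            simp at hy
        · exact fun d hd => (PySem.Set.mem_add done x d).2 (Or.inl hd)
        · intro d hd
          rcases (PySem.Set.mem_add done x d).1 hd with h | h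
          · exact Or.inl h
          · exact Or.inr (Or.inl h)
      · have hnames : x ∈ pvNames rules := pv_parL_ne_nil_mem_names hps
        have hrems := pv_remSum_drop (rules := rules) hnames hxd
        have hmu' : ∀ (d' : List String), (∀ e, e ∈ PySem.Set.add done x → e ∈ d') →
            ∀ k, pvMu rules d' [k] ≤ n := by
          intro d' hsub k
          have h1 : pvRemSum rules d' ≤ pvRemSum rules (PySem.Set.add done x) :=
            pv_remSum_mono hsub
          simp only [pvMu, List.length_cons, List.length_nil] at hmu ⊢
          omega
        have aux : ∀ (l : List String), (∀ k ∈ l, k ∈ pvAnc rules x) →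
            ∀ (r d : List String), (∀ e, e ∈ PySem.Set.add done x → e ∈ d) →
            (∀ e ∈ d, (∀ y ∈ pvCF rules e, y ∈ r) ∨ e = x ∨ (e ∈ done ∧ e ≠ x ∧ e ∉ pvAnc rules x)) →
            (pvRun rules r d l).1 = l.foldl (fun a k => PySem.Set.update a (pvCF rules k)) r ∧
            (∀ e ∈ (pvRun rules r d l).2,
                (∀ y ∈ pvCF rules e, y ∈ (pvRun rules r d l).1) ∨ e = x ∨
                (e ∈ done ∧ e ≠ x ∧ e ∉ pvAnc rules x)) ∧
            (∀ e ∈ d, e ∈ (pvRun rules r d l).2) ∧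
            (∀ e ∈ (pvRun rules r d l).2, e ∈ d ∨ e ∈ pvAnc rules x) := by
          intro l
          induction l with
          | nil =>
            intro _ r d hsub hinv
            rw [pv_run_nil]
            exact ⟨rfl, hinv, fun e he => he, fun e he => Or.inl he⟩
          | cons k l ihl =>
            intro hl r d hsub hinv
            have hkanc : k ∈ pvAnc rules x := hl k (by simp)
            have hkk : k ∉ pvAnc rules k := hcone k hkanc
            have hkcone : ∀ y ∈ pvAnc rules k, y ∉ pvAnc rules y :=
              fun y hy => hcone y (pv_anc_trans hkanc y hy)
            have hkgood : ∀ e ∈ d, (∀ y ∈ pvCF rules e, y ∈ r) ∨ (e ≠ k ∧ e ∉ pvAnc rules k) := by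
              intro e he
              rcases hinv e he with h | h | h
              · exact Or.inl h
              · subst h
                refine Or.inr ⟨?_, ?_⟩
                · intro hh; exact hx (hh ▸ hkanc)
                · intro hh; exact hx (pv_anc_trans hkanc _ hh)
              · refine Or.inr ⟨?_, ?_⟩
                · intro hh; exact h.2.2 (hh ▸ hkanc)
                · intro hh; exact h.2.2 (pv_anc_trans hkanc _ hh)
            have hk := ih k r d (hmu' d hsub k) hkk hkcone hkgood
            have hdec := pv_run_append rules (pvMu rules d [k]) r d [k] l (le_refl _)
            have hsub1 : ∀ e, e ∈ PySem.Set.add done x → e ∈ (pvRun rules r d [k]).2 :=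
              fun e he => hk.2.2.1 e (hsub e he)
            have hinv1 : ∀ e ∈ (pvRun rules r d [k]).2,
                (∀ y ∈ pvCF rules e, y ∈ (pvRun rules r d [k]).1) ∨ e = x ∨
                (e ∈ done ∧ e ≠ x ∧ e ∉ pvAnc rules x) := by
              intro e he
              rcases hk.2.1 e he with h | h
              · exact Or.inl h
              · rcases hinv e h.1 with h2 | h2 | h2
                · left
                  intro y hy
                  rw [hk.1]
                  exact pv_mem_update_left (h2 y hy)
                · exact Or.inr (Or.inl h2)
                · exact Or.inr (Or.inr h2)
            have hrec := ihl (fun k' hk' => hl k' (by simp [hk'])) (pvRun rules r d [k]).1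
              (pvRun rules r d [k]).2 hsub1 hinv1
            rw [show (k :: l) = [k] ++ l from rfl, hdec]
            refine ⟨?_, hrec.2.1, ?_, ?_⟩
            · rw [hrec.1, hk.1, List.singleton_append, List.foldl_cons]
            · intro e he
              exact hrec.2.2.1 e (hk.2.2.1 e he)
            · intro e he
              rcases hrec.2.2.2 e he with h | h
              · rcases hk.2.2.2 e h with h2 | h2 | h2
                · exact Or.inl h2
                · exact Or.inr (h2 ▸ hkanc)
                · exact Or.inr (pv_anc_trans hkanc e h2)
              · exact Or.inr h
        have hinv0 : ∀ e ∈ PySem.Set.add done x,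
            (∀ y ∈ pvCF rules e, y ∈ PySem.Set.update result (pvParL rules x)) ∨ e = x ∨
            (e ∈ done ∧ e ≠ x ∧ e ∉ pvAnc rules x) := by
          intro e he
          rcases (PySem.Set.mem_add done x e).1 he with h | h
          · rcases hgood e h with h2 | h2
            · exact Or.inl (fun y hy => pv_mem_update_left (h2 y hy))
            · exact Or.inr (Or.inr ⟨h, h2⟩)
          · exact Or.inr (Or.inl h)
        have ha := aux (pvParL rules x) (pv_parL_sub_anc rules x)
          (PySem.Set.update result (pvParL rules x)) (PySem.Set.add done x)
          (fun e he => he) hinv0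
        have hval : (pvParL rules x).foldl (fun a k => PySem.Set.update a (pvCF rules k))
            (PySem.Set.update result (pvParL rules x)) = PySem.Set.update result (pvCF rules x) := by
          have hcx : pvCF rules x =
              (pvCollect x rules).foldl (fun a k => PySem.Set.update a (pvCF rules k)) (pvCollect x rules) := by
            show pvFindA (rules.length + 1) x rules = _
            rw [pv_findA_succ_eq]
            apply pv_fold_congr
            intro k hk
            have hkpar : k ∈ pvParL rules x := by
              rw [pv_collect_eq] at hk
              exact (PySem.Set.mem_ofList _ _).1 hk
            have hkanc := pv_parL_sub_anc rules x k hkpar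
            have hkk := hcone k hkanc
            have hkcone : ∀ y ∈ pvAnc rules k, y ∉ pvAnc rules y :=
              fun y hy => hcone y (pv_anc_trans hkanc y hy)
            have hlen : (pvAnc rules k).length < (pvAnc rules x).length := pv_anc_lt hkanc hkk
            have hxlen : (pvAnc rules x).length ≤ rules.length := pv_anc_len_le rules x
            exact pv_findA_stab rules ((pvAnc rules k).length) k (le_refl _) hkk hkcone
              rules.length (rules.length + 1) (by omega) (by omega)
          rw [hcx, pv_collect_eq, pv_fuse_fold, pv_update_ofList, ← pv_fold_closure_ofList]
        have hfin1 : (pvRun rules (PySem.Set.update result (pvParL rules x))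
            (PySem.Set.add done x) (pvParL rules x)).1 = PySem.Set.update result (pvCF rules x) := by
          rw [ha.1, hval]
        refine ⟨hfin1, ?_, ?_, ?_⟩
        · intro d hd
          rcases ha.2.1 d hd with h | h | h
          · exact Or.inl (fun y hy => h y hy)
          · subst h
            left
            intro y hy
            rw [hfin1]
            exact (PySem.Set.mem_update _ _ _).2 (Or.inr hy)
          · exact Or.inr h
        · intro d hd
          exact ha.2.2.1 d ((PySem.Set.mem_add done x d).2 (Or.inl hd))
        · intro d hd
          rcases ha.2.2.2 d hd with h | h
          · rcases (PySem.Set.mem_add done x d).1 h with h2 | h2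
            · exact Or.inl h2
            · exact Or.inr (Or.inl h2)
          · exact Or.inr (Or.inr h)

-- ===== VERDICT (by name: the statement is the Claim_ definition above) =====
theorem find_keys_for_spec : Claim_equal_find_keys_for := by
  intro entry rules _ hpre
  unfold Spec_find_keys_for
  have hx : entry ∉ pvAnc rules entry := hpre entry (by simp)
  have hcone : ∀ y ∈ pvAnc rules entry, y ∉ pvAnc rules y :=
    fun y hy => hpre y (by simp [hy])
  have h1 : find_keys_for_alt entry rules = (pvRun rules [] [] [entry]).1 := by
    unfold find_keys_for_alt
    exact pv_loop_eq_run rules (pvMu rules [] [entry] + 1) [] [] [entry] (by omega)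
  have h2 := (pv_runS rules (pvMu rules [] [entry]) entry [] [] (le_refl _) hx hcone
    (by intro d hd; simp at hd)).1
  have h3 : PySem.Set.update ([] : List String) (pvCF rules entry) = PySem.Set.ofList (pvCF rules entry) := rfl
  have h4 : PySem.Set.ofList (pvCF rules entry) = pvCF rules entry :=
    PySem.Set.ofList_eq_self_of_nodup _ (pv_findA_nodup rules _ _)
  show find_keys_for entry rules = find_keys_for_alt entry rules
  rw [h1, h2, h3, h4]
  rfl

theorem find_keys_for_raises : Claim_raises_find_keys_for := by
  unfold Claim_raises_find_keys_for
  constructor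
  · intro entry rules _ hr hpre
    obtain ⟨x, hx1, hx2⟩ := hr
    exact hpre x hx1 hx2
  · exact ⟨by decide, by decide, by decide⟩

-- witness self-check: the crash-fix witness really lies in Raises_ and B's port really returns the stated value there
theorem pvRaiseWitness_ok :
    Raises_find_keys_for pvRaiseWitness_find_keys_for.1 pvRaiseWitness_find_keys_for.2 ∧
    find_keys_for_alt pvRaiseWitness_find_keys_for.1 pvRaiseWitness_find_keys_for.2 = pvRaiseWitnessOut_find_keys_for :=
  ⟨find_keys_for_raises.2.2.1, find_keys_for_raises.2.2.2⟩
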